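-- pv_equiv track=rewrite | github.com/Viknesh-Rajaramon/Leetcode-Problems | Algorithms/Hard/3533_Concatenated_Divisibility/Python3.py | concatenatedDivisibility
-- ===== SOURCE A (Python) =====
-- from typing import List
-- from functools import cache
--
-- def concatenatedDivisibility(nums: List[int], k: int) -> List[int]:
--     n = len(nums)
--     nums.sort()
--     result = []
--
--     @cache
--     def dp(mask, r):
--         if mask == (1 << n) - 1:
--             return r == 0
--
--         for i in range(n):
--             if (1 << i) & mask:
--                 continue
--
--             result.append(nums[i])
--             if dp(mask | (1 << i), int(str(r) + str(nums[i])) % k):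
--                 return True
--
--             result.pop()
--
--         return False
--
--     dp(0, 0)
--     return result
-- ===== SOURCE B (Python) =====
-- from typing import List
-- from functools import cache
--
--
-- def concatenatedDivisibility(nums: List[int], k: int) -> List[int]:
--     # Sorts nums in place (same observable mutation as the original).
--     nums.sort()
--     n = len(nums)
--     full = (1 << n) - 1
--
--     # Pure feasibility predicate: from state (mask, r), can the unused
--     # numbers be appended (in some order) so that the final remainder is 0?
--     @cache
--     def feasible(mask, r):
--         if mask == full:
--             return r == 0
--         return any(feasible(mask | (1 << i), int(str(r) + str(nums[i])) % k)
--                    for i in range(n) if not mask & (1 << i))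
--
--     if not feasible(0, 0):
--         return []
--
--     # Greedy reconstruction: always take the smallest unused number (smallest
--     # sorted index) that keeps the remaining problem feasible.
--     result = []
--     mask, r = 0, 0
--     while mask != full:
--         for i in range(n):
--             bit = 1 << i
--             if not mask & bit:
--                 nr = int(str(r) + str(nums[i])) % k
--                 if feasible(mask | bit, nr):
--                     result.append(nums[i])
--                     mask |= bit
--                     r = nr
--                     break
--     return result
-- ===== Notes on version B (the rewrite author's own statement) =====
-- stated objective: alternative
-- what changed: A is a single backtracking DFS that produces the answer as a side effect on a shared mutable path (append/pop); B separates the problem into a pure memoized feasibility predicate over (mask, remainder) states plus an independent iterative greedy reconstruction loop that picks, at each step, the smallest unused sorted index leading to a feasible state.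
import Mathlib
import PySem

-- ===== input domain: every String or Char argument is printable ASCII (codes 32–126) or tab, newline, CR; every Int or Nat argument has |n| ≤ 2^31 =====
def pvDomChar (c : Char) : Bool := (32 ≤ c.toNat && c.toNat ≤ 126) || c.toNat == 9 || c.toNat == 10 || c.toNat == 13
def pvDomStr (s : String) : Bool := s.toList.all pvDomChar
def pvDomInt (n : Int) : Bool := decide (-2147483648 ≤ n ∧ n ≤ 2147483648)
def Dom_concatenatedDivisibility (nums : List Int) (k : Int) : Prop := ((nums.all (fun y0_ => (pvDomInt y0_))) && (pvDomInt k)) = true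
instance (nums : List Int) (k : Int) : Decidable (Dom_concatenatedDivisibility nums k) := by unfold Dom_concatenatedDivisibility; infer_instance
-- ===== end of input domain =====

-- B replaces A's backtracking DFS (answer built by append/pop side effects on a shared path)
-- with a pure feasibility predicate over (mask, remainder) states plus a separate iterative
-- greedy reconstruction loop; equivalence is about the RETURN value (both Pythons sort nums
-- in place the same way).

-- shared helper: int(str(r) + str(v)) % k.  .getD 0 and the total mod only matter outside
-- Pre_ (they compensate for Python's ValueError on negative v and ZeroDivisionError on k = 0).
def pvConcatMod (k r v : Int) : Int :=
  PySem.Int.mod ((PySem.Int.ofStr? (PySem.Int.toStr r ++ PySem.Int.toStr v)).getD 0) k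

-- shared helper: nums[i] for 0 ≤ i < len(nums)
def pvGetE (s : List Int) (i : Nat) : Int := (PySem.List.pyGet? s (i : Int)).getD 0

-- ===== PORT A =====
-- dp(mask, r) with the shared mutable `result` threaded through as state; the functools.cache
-- only memoizes (a False call has zero net effect on `result`), so values are those of the
-- uncached recursion.  `fuel` is a termination device: the top call passes n+1 and each
-- recursion adds one bit to mask, so the 0 branch never fires.
mutual
def pvDpA (s : List Int) (k : Int) (n : Nat) (fuel : Nat) (mask : Nat) (r : Int)
    (res : List Int) : Bool × List Int :=
  if mask = (1 <<< n) - 1 then (decide (r = 0), res)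
  else match fuel with
    | 0 => (false, res)
    | f + 1 => pvDpLoopA s k n f mask r res 0
termination_by (fuel, 0)

-- the `for i in range(n)` loop of dp, entered at index i
def pvDpLoopA (s : List Int) (k : Int) (n : Nat) (f : Nat) (mask : Nat) (r : Int)
    (res : List Int) (i : Nat) : Bool × List Int :=
  if _h : i < n then
    if (1 <<< i) &&& mask ≠ 0 then pvDpLoopA s k n f mask r res (i + 1)   -- continue
    else
      let v := pvGetE s i
      let p := pvDpA s k n f (mask ||| (1 <<< i)) (pvConcatMod k r v) (res ++ [v])
      if p.1 then (true, p.2)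
      else pvDpLoopA s k n f mask r p.2.dropLast (i + 1)
        -- result.pop(): p.2 = res ++ [v] is nonempty here, so dropLast is exact
  else (false, res)
termination_by (f, n + 1 - i)
end

def concatenatedDivisibility (nums : List Int) (k : Int) : List Int :=
  let s := PySem.List.sorted nums (fun x => x) false   -- nums.sort()
  let n := s.length
  (pvDpA s k n (n + 1) 0 0 []).2

-- ===== PORT B =====
-- pure feasibility predicate `feasible(mask, r)` (the @cache only memoizes; values are those
-- of the plain recursion).  `fuel` is a termination device: every call made by the program
-- has fuel ≥ number of unset bits, so the 0 branch never fires.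
def pvFeasB (s : List Int) (k : Int) (n : Nat) (fuel : Nat) (mask : Nat) (r : Int) : Bool :=
  if mask = (1 <<< n) - 1 then decide (r = 0)
  else match fuel with
    | 0 => false
    | f + 1 =>
      (List.range n).any (fun i =>
        decide (mask &&& (1 <<< i) = 0) &&
        pvFeasB s k n f (mask ||| (1 <<< i)) (pvConcatMod k r (pvGetE s i)))
termination_by fuel

-- the inner `for i in range(n)` of the while loop: first unused i leading to a feasible state
def pvFindB (s : List Int) (k : Int) (n : Nat) (mask : Nat) (r : Int) (i : Nat) :
    Option (Nat × Int) :=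
  if _h : i < n then
    let bit := 1 <<< i
    if mask &&& bit = 0 then
      let nr := pvConcatMod k r (pvGetE s i)
      if pvFeasB s k n (n + 1) (mask ||| bit) nr then some (i, nr)
      else pvFindB s k n mask r (i + 1)
    else pvFindB s k n mask r (i + 1)
  else none
termination_by n - i

-- the while loop; fuel = n iterations suffice (each one sets a bit).  The `none` branch is
-- unreachable under the feasible(0, 0) guard (there Python's while would make no progress).
def pvBuildB (s : List Int) (k : Int) (n : Nat) (fuel : Nat) (mask : Nat) (r : Int)
    (res : List Int) : List Int :=
  if mask = (1 <<< n) - 1 then res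
  else match fuel with
    | 0 => res
    | f + 1 =>
      match pvFindB s k n mask r 0 with
      | some (i, nr) => pvBuildB s k n f (mask ||| (1 <<< i)) nr (res ++ [pvGetE s i])
      | none => res
termination_by fuel

def concatenatedDivisibility_alt (nums : List Int) (k : Int) : List Int :=
  let s := PySem.List.sorted nums (fun x => x) false   -- nums.sort()
  let n := s.length
  if ! pvFeasB s k n (n + 1) 0 0 then []
  else pvBuildB s k n n 0 0 []

-- ===== PRECONDITION & SPEC =====
-- Pre_ excludes exactly the inputs where Python A raises: with nums nonempty, k = 0 gives
-- ZeroDivisionError and a negative element gives ValueError (int("…-…")); A returns otherwise.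
def Pre_concatenatedDivisibility (nums : List Int) (k : Int) : Prop :=
  nums = [] ∨ (k ≠ 0 ∧ ∀ x ∈ nums, 0 ≤ x)
instance (nums : List Int) (k : Int) : Decidable (Pre_concatenatedDivisibility nums k) := by
  unfold Pre_concatenatedDivisibility; infer_instance

def pvWitness_concatenatedDivisibility : List Int × Int := ([2, 5], 5)

def Spec_concatenatedDivisibility (nums : List Int) (k : Int) (out : List Int) : Prop := out = concatenatedDivisibility_alt nums k
instance (nums : List Int) (k : Int) (out : List Int) : Decidable (Spec_concatenatedDivisibility nums k out) := by unfold Spec_concatenatedDivisibility; infer_instance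

-- ===== CLAIM (what is proved, stated in full; the proofs are below) =====
def Claim_equal_concatenatedDivisibility : Prop := ∀ (nums : List Int) (k : Int), Dom_concatenatedDivisibility nums k → Pre_concatenatedDivisibility nums k → Spec_concatenatedDivisibility nums k (concatenatedDivisibility nums k)

-- ===== LEMMAS AND PROOFS =====

-- ---- proof-side helpers ----

-- number of unset bits of mask below n
def pvUnset (n mask : Nat) : Nat :=
  ((Finset.range n).filter (fun j => mask.testBit j = false)).card

-- first index i ≤ j < n with bit j unused and the successor state feasible at fuel fl
def pvFirst (s : List Int) (k : Int) (n : Nat) (fl : Nat) (mask : Nat) (r : Int)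
    (i : Nat) : Option Nat :=
  if _h : i < n then
    if (mask &&& (1 <<< i) = 0) ∧
        pvFeasB s k n fl (mask ||| (1 <<< i)) (pvConcatMod k r (pvGetE s i)) = true
    then some i
    else pvFirst s k n fl mask r (i + 1)
  else none
termination_by n - i

-- the greedy path from (mask, r), fuel-indexed like pvFeasB
def pvPath (s : List Int) (k : Int) (n : Nat) : Nat → Nat → Int → List Int
  | 0, _, _ => []
  | f + 1, mask, r =>
    match pvFirst s k n f mask r 0 with
    | some i => pvGetE s i :: pvPath s k n f (mask ||| (1 <<< i)) (pvConcatMod k r (pvGetE s i))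
    | none => []

-- ---- bit bookkeeping ----

theorem pv_band_pow_eq_zero (m i : Nat) : (m &&& (1 <<< i) = 0) ↔ m.testBit i = false := by
  rw [Nat.shiftLeft_eq, one_mul, Nat.and_two_pow]
  rcases h : m.testBit i <;> simp

theorem pv_testBit_lor_pow (m i j : Nat) :
    (m ||| (1 <<< i)).testBit j = (m.testBit j || decide (j = i)) := by
  rw [Nat.shiftLeft_eq, one_mul, Nat.testBit_or, Nat.testBit_two_pow]
  simp [eq_comm]

theorem pv_full_testBit (n j : Nat) (hj : j < n) : ((1 <<< n) - 1 : Nat).testBit j = true := by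
  rw [Nat.shiftLeft_eq, one_mul, Nat.testBit_two_pow_sub_one]
  simpa using hj

theorem pvUnset_le (n mask : Nat) : pvUnset n mask ≤ n := by
  unfold pvUnset
  exact le_trans (Finset.card_filter_le _ _) (by simp)

theorem pvUnset_pos (n mask i : Nat) (hi : i < n) (hb : mask.testBit i = false) :
    0 < pvUnset n mask := by
  unfold pvUnset
  exact Finset.card_pos.mpr ⟨i, by simp [Finset.mem_filter, hi, hb]⟩

theorem pvUnset_lor (n mask i : Nat) (hi : i < n) (hb : mask.testBit i = false) :
    pvUnset n (mask ||| (1 <<< i)) + 1 = pvUnset n mask := by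
  unfold pvUnset
  have hset : (Finset.range n).filter (fun j => (mask ||| (1 <<< i)).testBit j = false)
      = ((Finset.range n).filter (fun j => mask.testBit j = false)).erase i := by
    ext j
    simp only [Finset.mem_erase, Finset.mem_filter, Finset.mem_range, pv_testBit_lor_pow]
    constructor
    · rintro ⟨hjn, hj⟩
      rcases Bool.or_eq_false_iff.mp hj with ⟨h1, h2⟩
      exact ⟨by simpa using h2, hjn, h1⟩
    · rintro ⟨hne, hjn, hj⟩
      exact ⟨hjn, by simp [hj, hne]⟩
  rw [hset]
  exact Finset.card_erase_add_one (by simp [Finset.mem_filter, hi, hb])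

theorem pvUnset_zero_bit (n mask : Nat) (h : pvUnset n mask = 0) (j : Nat) (hj : j < n) :
    mask.testBit j = true := by
  by_contra hb
  have : 0 < pvUnset n mask := pvUnset_pos n mask j hj (by simpa using hb)
  omega

theorem pvUnset_full (n : Nat) : pvUnset n ((1 <<< n) - 1) = 0 := by
  unfold pvUnset
  rw [Finset.card_eq_zero]
  ext j
  simp only [Finset.mem_filter, Finset.mem_range, Finset.notMem_empty, iff_false, not_and]
  intro hj
  simp [pv_full_testBit n j hj]

theorem pv_any_congr {a : Type} (l : List a) (f g : a → Bool)
    (h : ∀ x ∈ l, f x = g x) : l.any f = l.any g := by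
  induction l with
  | nil => rfl
  | cons x xs IH =>
    simp only [List.any_cons]
    rw [h x (List.mem_cons_self), IH (fun y hy => h y (List.mem_cons_of_mem x hy))]

-- ---- feasibility lemmas ----

theorem pv_feas_full (s : List Int) (k : Int) (n fl : Nat) (r : Int) :
    pvFeasB s k n fl ((1 <<< n) - 1) r = decide (r = 0) := by
  rw [pvFeasB.eq_def]; simp

theorem pv_feas_dead (s : List Int) (k : Int) (n fl mask : Nat) (r : Int)
    (hm : mask ≠ (1 <<< n) - 1) (h0 : pvUnset n mask = 0) :
    pvFeasB s k n fl mask r = false := by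
  rw [pvFeasB.eq_def]
  simp only [if_neg hm]
  cases fl with
  | zero => rfl
  | succ f =>
    rw [List.any_eq_false]
    intro i hi
    have hbit := pvUnset_zero_bit n mask h0 i (List.mem_range.mp hi)
    simp [pv_band_pow_eq_zero, hbit]

theorem pv_feas_fuel (s : List Int) (k : Int) (n : Nat) :
    ∀ (u mask : Nat) (r : Int) (a b : Nat), pvUnset n mask = u → u ≤ a → u ≤ b →
      pvFeasB s k n a mask r = pvFeasB s k n b mask r := by
  intro u
  induction u using Nat.strong_induction_on with
  | _ u IH =>
    intro mask r a b hu ha hb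
    by_cases hm : mask = (1 <<< n) - 1
    · subst hm; rw [pv_feas_full, pv_feas_full]
    · cases u with
      | zero =>
        rw [pv_feas_dead s k n a mask r hm hu, pv_feas_dead s k n b mask r hm hu]
      | succ u' =>
        obtain ⟨a', rfl⟩ : ∃ a', a = a' + 1 := ⟨a - 1, by omega⟩
        obtain ⟨b', rfl⟩ : ∃ b', b = b' + 1 := ⟨b - 1, by omega⟩
        conv_lhs => rw [pvFeasB.eq_def]
        conv_rhs => rw [pvFeasB.eq_def]
        simp only [if_neg hm]
        apply pv_any_congr
        intro i hi
        by_cases hbit : mask.testBit i = false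
        · have hcnt := pvUnset_lor n mask i (List.mem_range.mp hi) hbit
          have : pvFeasB s k n a' (mask ||| (1 <<< i)) (pvConcatMod k r (pvGetE s i))
              = pvFeasB s k n b' (mask ||| (1 <<< i)) (pvConcatMod k r (pvGetE s i)) :=
            IH u' (by omega) (mask ||| (1 <<< i)) (pvConcatMod k r (pvGetE s i)) a' b'
              (by omega) (by omega) (by omega)
          rw [this]
        · have : ¬ (mask &&& (1 <<< i) = 0) := by
            rw [pv_band_pow_eq_zero]; simpa using hbit
          simp [this]

-- ---- pvFirst lemmas ----

theorem pv_first_none_of_zero (s : List Int) (k : Int) (n fl mask : Nat) (r : Int)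
    (h0 : pvUnset n mask = 0) : ∀ (d i : Nat), n - i ≤ d →
    pvFirst s k n fl mask r i = none := by
  intro d
  induction d with
  | zero =>
    intro i hd
    rw [pvFirst]
    simp only [dif_neg (by omega : ¬ i < n)]
  | succ d IH =>
    intro i hd
    rw [pvFirst]
    by_cases hin : i < n
    · have hbit := pvUnset_zero_bit n mask h0 i hin
      have hband : ¬ (mask &&& (1 <<< i) = 0 ∧
          pvFeasB s k n fl (mask ||| (1 <<< i)) (pvConcatMod k r (pvGetE s i)) = true) := by
        rintro ⟨h1, _⟩
        rw [pv_band_pow_eq_zero] at h1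
        simp [hbit] at h1
      simp only [dif_pos hin, if_neg hband]
      exact IH (i + 1) (by omega)
    · simp only [dif_neg hin]

theorem pv_first_some (s : List Int) (k : Int) (n fl mask : Nat) (r : Int) :
    ∀ (d i j : Nat), n - i ≤ d → pvFirst s k n fl mask r i = some j →
      j < n ∧ mask &&& (1 <<< j) = 0 ∧
        pvFeasB s k n fl (mask ||| (1 <<< j)) (pvConcatMod k r (pvGetE s j)) = true := by
  intro d
  induction d with
  | zero =>
    intro i j hd h
    rw [pvFirst] at h
    simp only [dif_neg (by omega : ¬ i < n)] at h
    cases h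
  | succ d IH =>
    intro i j hd h
    rw [pvFirst] at h
    by_cases hin : i < n
    · simp only [dif_pos hin] at h
      split at h
      · rename_i hc
        cases h
        exact ⟨hin, hc.1, hc.2⟩
      · exact IH (i + 1) j (by omega) h
    · simp only [dif_neg hin] at h
      cases h

theorem pv_feas_first (s : List Int) (k : Int) (n fl mask : Nat) (r : Int)
    (hm : mask ≠ (1 <<< n) - 1) :
    pvFeasB s k n (fl + 1) mask r = (pvFirst s k n fl mask r 0).isSome := by
  rw [pvFeasB.eq_def]
  simp only [if_neg hm]
  have aux : ∀ (d i : Nat), n - i ≤ d →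
      ((List.range' i (n - i)).any (fun i =>
        decide (mask &&& (1 <<< i) = 0) &&
        pvFeasB s k n fl (mask ||| (1 <<< i)) (pvConcatMod k r (pvGetE s i))))
      = (pvFirst s k n fl mask r i).isSome := by
    intro d
    induction d with
    | zero =>
      intro i hd
      have h0 : n - i = 0 := by omega
      rw [h0, pvFirst]
      simp only [dif_neg (by omega : ¬ i < n)]
      rfl
    | succ d IH =>
      intro i hd
      by_cases hin : i < n
      · have hsplit : n - i = (n - (i + 1)) + 1 := by omega
        rw [hsplit, List.range'_succ]
        rw [pvFirst]
        simp only [dif_pos hin, List.any_cons]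
        by_cases hc : mask &&& (1 <<< i) = 0 ∧
            pvFeasB s k n fl (mask ||| (1 <<< i)) (pvConcatMod k r (pvGetE s i)) = true
        · rw [if_pos hc]
          simp [hc.1, hc.2]
        · rw [if_neg hc]
          have hfalse : (decide (mask &&& (1 <<< i) = 0) &&
              pvFeasB s k n fl (mask ||| (1 <<< i)) (pvConcatMod k r (pvGetE s i))) = false := by
            by_cases h1 : mask &&& (1 <<< i) = 0
            · have h2 : pvFeasB s k n fl (mask ||| (1 <<< i)) (pvConcatMod k r (pvGetE s i)) = false := by
                have hn : ¬ pvFeasB s k n fl (mask ||| (1 <<< i)) (pvConcatMod k r (pvGetE s i)) = true :=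
                  fun hb => hc ⟨h1, hb⟩
                simpa using hn
              simp [h2]
            · simp [h1]
          rw [hfalse]
          simp only [Bool.false_or]
          exact IH (i + 1) (by omega)
      · have h0 : n - i = 0 := by omega
        rw [h0, pvFirst]
        simp only [dif_neg hin]
        rfl
  have : List.range n = List.range' 0 (n - 0) := by
    simp [List.range_eq_range']
  rw [this]
  exact aux n 0 (by omega)

-- ---- A's dp equals (feasibility, res ++ greedy path) ----

theorem pv_dpA_eq (s : List Int) (k : Int) (n : Nat) :
    ∀ (f mask : Nat) (r : Int) (res : List Int),
      pvDpA s k n f mask r res =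
        (pvFeasB s k n f mask r,
         if pvFeasB s k n f mask r = true then res ++ pvPath s k n f mask r else res) := by
  intro f
  induction f with
  | zero =>
    intro mask r res
    rw [pvDpA.eq_def, pvFeasB.eq_def]
    by_cases hm : mask = (1 <<< n) - 1
    · simp only [if_pos hm, pvPath]
      rcases h : decide (r = 0) <;> simp
    · simp [hm]
  | succ f IH =>
    intro mask r res
    by_cases hm : mask = (1 <<< n) - 1
    · rw [pvDpA.eq_def]
      simp only [if_pos hm]
      subst hm
      rw [pv_feas_full]
      have hp : pvPath s k n (f + 1) ((1 <<< n) - 1) r = [] := by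
        rw [pvPath]
        rw [pv_first_none_of_zero s k n f ((1 <<< n) - 1) r (pvUnset_full n) n 0 (by omega)]
      rw [hp]
      rcases h : decide (r = 0) <;> simp
    · have hloop : ∀ (d i : Nat) (res : List Int), n - i ≤ d →
          pvDpLoopA s k n f mask r res i =
            (match pvFirst s k n f mask r i with
             | some j => (true, res ++ (pvGetE s j ::
                 pvPath s k n f (mask ||| (1 <<< j)) (pvConcatMod k r (pvGetE s j))))
             | none => (false, res)) := by
        intro d
        induction d with
        | zero =>
          intro i res hd
          rw [pvDpLoopA, pvFirst]
          simp only [dif_neg (by omega : ¬ i < n)]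
        | succ d IHd =>
          intro i res hd
          rw [pvDpLoopA, pvFirst]
          by_cases hin : i < n
          · simp only [dif_pos hin]
            by_cases hband : (1 <<< i) &&& mask ≠ 0
            · have hband' : ¬ (mask &&& (1 <<< i) = 0) := by
                rw [Nat.and_comm] at hband; exact hband
              simp only [if_pos hband]
              have hnc : ¬ (mask &&& (1 <<< i) = 0 ∧
                  pvFeasB s k n f (mask ||| (1 <<< i)) (pvConcatMod k r (pvGetE s i)) = true) := by
                rintro ⟨h1, _⟩; exact hband' h1
              rw [if_neg hnc]
              exact IHd (i + 1) res (by omega)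
            · simp only [if_neg hband]
              have hband0 : mask &&& (1 <<< i) = 0 := by
                rw [Nat.and_comm]; omega
              rw [IH (mask ||| (1 <<< i)) (pvConcatMod k r (pvGetE s i)) (res ++ [pvGetE s i])]
              by_cases hFc : pvFeasB s k n f (mask ||| (1 <<< i)) (pvConcatMod k r (pvGetE s i)) = true
              · have hcond : mask &&& (1 <<< i) = 0 ∧
                    pvFeasB s k n f (mask ||| (1 <<< i)) (pvConcatMod k r (pvGetE s i)) = true :=
                  ⟨hband0, hFc⟩
                rw [if_pos hcond]
                simp [hFc]
              · have hFc' : pvFeasB s k n f (mask ||| (1 <<< i)) (pvConcatMod k r (pvGetE s i)) = false := by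
                  simpa using hFc
                rw [if_neg (show ¬ (mask &&& (1 <<< i) = 0 ∧
                    pvFeasB s k n f (mask ||| (1 <<< i)) (pvConcatMod k r (pvGetE s i)) = true)
                  from fun hc => hFc hc.2)]
                simp only [hFc', Bool.false_eq_true, if_false, List.dropLast_concat]
                exact IHd (i + 1) res (by omega)
          · simp only [dif_neg hin]
      rw [pvDpA.eq_def]
      simp only [if_neg hm]
      rw [hloop n 0 res (by omega)]
      rw [pv_feas_first s k n f mask r hm, pvPath]
      rcases hfs : pvFirst s k n f mask r 0 with _ | j
      · simp
      · simp

-- ---- B's while loop yields the greedy path ----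

theorem pv_find_eq (s : List Int) (k : Int) (n fl mask : Nat) (r : Int)
    (h : pvUnset n mask ≤ fl + 1) : ∀ (d i : Nat), n - i ≤ d →
    pvFindB s k n mask r i =
      (pvFirst s k n fl mask r i).map (fun j => (j, pvConcatMod k r (pvGetE s j))) := by
  intro d
  induction d with
  | zero =>
    intro i hd
    rw [pvFindB]
    conv_rhs => rw [pvFirst]
    simp only [dif_neg (by omega : ¬ i < n)]
    rfl
  | succ d IH =>
    intro i hd
    rw [pvFindB]
    conv_rhs => rw [pvFirst]
    by_cases hin : i < n
    · simp only [dif_pos hin]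
      by_cases hband : mask &&& (1 <<< i) = 0
      · simp only [if_pos hband]
        have hbit : mask.testBit i = false := (pv_band_pow_eq_zero _ _).mp hband
        have hcnt := pvUnset_lor n mask i hin hbit
        have hfe : pvFeasB s k n (n + 1) (mask ||| (1 <<< i)) (pvConcatMod k r (pvGetE s i))
            = pvFeasB s k n fl (mask ||| (1 <<< i)) (pvConcatMod k r (pvGetE s i)) := by
          have hle := pvUnset_le n (mask ||| (1 <<< i))
          exact pv_feas_fuel s k n _ _ _ _ _ rfl (by omega) (by omega)
        rw [hfe]
        by_cases hFc : pvFeasB s k n fl (mask ||| (1 <<< i)) (pvConcatMod k r (pvGetE s i)) = true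
        · have hcond : mask &&& (1 <<< i) = 0 ∧
              pvFeasB s k n fl (mask ||| (1 <<< i)) (pvConcatMod k r (pvGetE s i)) = true :=
            ⟨hband, hFc⟩
          rw [if_pos hFc, if_pos hcond]
          rfl
        · rw [if_neg hFc, if_neg (fun hc => hFc hc.2)]
          exact IH (i + 1) (by omega)
      · rw [if_neg hband, if_neg (fun hc => hband hc.1)]
        exact IH (i + 1) (by omega)
    · simp only [dif_neg hin]
      rfl

theorem pv_build_eq (s : List Int) (k : Int) (n : Nat) :
    ∀ (f mask : Nat) (r : Int) (res : List Int), pvUnset n mask ≤ f →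
      pvFeasB s k n (f + 1) mask r = true →
      pvBuildB s k n f mask r res = res ++ pvPath s k n (f + 1) mask r := by
  intro f
  induction f with
  | zero =>
    intro mask r res hu hF
    by_cases hm : mask = (1 <<< n) - 1
    · rw [pvBuildB.eq_def]
      simp only [if_pos hm]
      subst hm
      rw [pvPath, pv_first_none_of_zero s k n 0 ((1 <<< n) - 1) r (pvUnset_full n) n 0 (by omega)]
      simp
    · rw [pv_feas_dead s k n 1 mask r hm (by omega)] at hF
      cases hF
  | succ f IH =>
    intro mask r res hu hF
    by_cases hm : mask = (1 <<< n) - 1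
    · rw [pvBuildB.eq_def]
      simp only [if_pos hm]
      subst hm
      rw [pvPath, pv_first_none_of_zero s k n (f + 1) ((1 <<< n) - 1) r (pvUnset_full n) n 0 (by omega)]
      simp
    · rw [pvBuildB.eq_def]
      simp only [if_neg hm]
      rw [pv_find_eq s k n (f + 1) mask r (by omega) n 0 (by omega)]
      have hsome : (pvFirst s k n (f + 1) mask r 0).isSome = true := by
        rw [← pv_feas_first s k n (f + 1) mask r hm]
        exact hF
      rcases hfs : pvFirst s k n (f + 1) mask r 0 with _ | j
      · rw [hfs] at hsome; cases hsome
      · obtain ⟨hjn, hband, hFc⟩ := pv_first_some s k n (f + 1) mask r n 0 j (by omega) hfs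
        simp only [Option.map_some]
        have hbit : mask.testBit j = false := (pv_band_pow_eq_zero _ _).mp hband
        have hcnt := pvUnset_lor n mask j hjn hbit
        rw [IH (mask ||| (1 <<< j)) (pvConcatMod k r (pvGetE s j)) (res ++ [pvGetE s j])
            (by omega) hFc]
        conv_rhs => rw [pvPath]
        rw [hfs]
        simp

-- ===== VERDICT (by name: the statement is the Claim_ definition above) =====
theorem concatenatedDivisibility_spec : Claim_equal_concatenatedDivisibility := by
  intro nums k _ _
  unfold Spec_concatenatedDivisibility concatenatedDivisibility concatenatedDivisibility_alt
  simp only []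
  set s := PySem.List.sorted nums (fun x => x) false with hs
  set n := s.length with hn
  rw [pv_dpA_eq s k n (n + 1) 0 0 []]
  by_cases hF : pvFeasB s k n (n + 1) 0 0 = true
  · rw [pv_build_eq s k n n 0 0 [] (pvUnset_le n 0) hF]
    simp [hF]
  · have hFf : pvFeasB s k n (n + 1) 0 0 = false := by simpa using hF
    simp [hFf]
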